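-- pv_equiv track=rewrite | github.com/weirrf313/Personal_Projects | Hangman/Hangman_function.py | complete_check
-- ===== SOURCE A (Python) =====
-- def complete_check(usersguess, word, list):
--     list = []
--     for letter in usersguess:
--         if letter in word:
--             list.append(letter)
--
--     if len(set(list)) == len(set(word)):
--         return 1
--     else:
--         return 0
-- ===== SOURCE B (Python) =====
-- def complete_check(usersguess, word, list):
--     return 1 if set(word) <= set(usersguess) else 0
-- ===== Notes on version B (the rewrite author's own statement) =====
-- stated objective: faster
-- what changed: Replaces A's filtering loop plus distinct-count comparison with a single set-containment test set(word) <= set(usersguess).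
import Mathlib
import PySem

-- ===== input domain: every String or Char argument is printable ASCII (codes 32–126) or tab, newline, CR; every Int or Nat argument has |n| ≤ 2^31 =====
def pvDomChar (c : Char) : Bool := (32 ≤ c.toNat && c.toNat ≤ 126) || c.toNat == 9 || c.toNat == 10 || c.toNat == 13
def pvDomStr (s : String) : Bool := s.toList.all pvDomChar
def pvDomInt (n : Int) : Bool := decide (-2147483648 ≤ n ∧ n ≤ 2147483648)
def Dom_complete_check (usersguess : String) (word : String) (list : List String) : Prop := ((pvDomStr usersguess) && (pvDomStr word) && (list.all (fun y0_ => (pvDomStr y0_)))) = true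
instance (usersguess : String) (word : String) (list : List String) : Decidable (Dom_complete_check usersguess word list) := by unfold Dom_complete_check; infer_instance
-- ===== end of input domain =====

-- B replaces A's filtering loop plus distinct-count comparison with a single set-containment test (same result, simpler).


-- ===== PORT A =====
-- 'letter in word' on a single character is character membership.
def complete_check (usersguess : String) (word : String) (list : List String) : Int :=
  let lst : List Char :=
    usersguess.toList.foldl
      (fun acc letter => if word.toList.contains letter then acc ++ [letter] else acc) []
  if (PySem.Set.ofList lst).length = (PySem.Set.ofList word.toList).length then 1 else 0

-- ===== PORT B =====
def complete_check_alt (usersguess : String) (word : String) (list : List String) : Int :=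
  if PySem.Set.issubset (PySem.Set.ofList word.toList) (PySem.Set.ofList usersguess.toList) then 1 else 0

-- ===== PRECONDITION & SPEC =====
def Spec_complete_check (usersguess : String) (word : String) (list : List String) (out : Int) : Prop := out = complete_check_alt usersguess word list
instance (usersguess : String) (word : String) (list : List String) (out : Int) : Decidable (Spec_complete_check usersguess word list out) := by unfold Spec_complete_check; infer_instance

-- ===== CLAIM (what is proved, stated in full; the proofs are below) =====
def Claim_equal_complete_check : Prop := ∀ (usersguess : String) (word : String) (list : List String), Dom_complete_check usersguess word list → Spec_complete_check usersguess word list (complete_check usersguess word list)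

-- ===== LEMMAS AND PROOFS =====

-- distinct filtered guess letters vs distinct word letters: counts agree iff every word letter was guessed
lemma count_eq_iff_subset (g w : List Char) :
    ((PySem.Set.ofList (g.filter (fun c => w.contains c))).length
      = (PySem.Set.ofList w).length) ↔ (∀ c ∈ w, c ∈ g) := by
  have hmemF : ∀ c, c ∈ PySem.Set.ofList (g.filter (fun c => w.contains c)) ↔ (c ∈ g ∧ c ∈ w) := by
    intro c
    simp [PySem.Set.mem_ofList, List.mem_filter]
  have hmemW : ∀ c, c ∈ PySem.Set.ofList w ↔ c ∈ w := fun c => PySem.Set.mem_ofList w c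
  have hsubF : PySem.Set.ofList (g.filter (fun c => w.contains c)) ⊆ PySem.Set.ofList w := by
    intro c hc
    exact (hmemW c).mpr ((hmemF c).mp hc).2
  have hsp : List.Subperm (PySem.Set.ofList (g.filter (fun c => w.contains c))) (PySem.Set.ofList w) :=
    List.subperm_of_subset (PySem.Set.nodup_ofList _) hsubF
  constructor
  · intro hlen c hcw
    have hperm := hsp.perm_of_length_le (le_of_eq hlen.symm)
    have : c ∈ PySem.Set.ofList (g.filter (fun c => w.contains c)) :=
      hperm.mem_iff.mpr ((hmemW c).mpr hcw)
    exact ((hmemF c).mp this).1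
  · intro hsub
    have hsubW : PySem.Set.ofList w ⊆ PySem.Set.ofList (g.filter (fun c => w.contains c)) := by
      intro c hc
      have hcw := (hmemW c).mp hc
      exact (hmemF c).mpr ⟨hsub c hcw, hcw⟩
    have hsp' : List.Subperm (PySem.Set.ofList w) (PySem.Set.ofList (g.filter (fun c => w.contains c))) :=
      List.subperm_of_subset (PySem.Set.nodup_ofList _) hsubW
    exact le_antisymm hsp.length_le hsp'.length_le

-- ===== VERDICT (by name: the statement is the Claim_ definition above) =====
theorem complete_check_spec : Claim_equal_complete_check := by
  intro usersguess word list _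
  unfold Spec_complete_check complete_check complete_check_alt
  rw [PySem.List.foldl_append_if_eq_filter]
  have hiff : ((PySem.Set.ofList (usersguess.toList.filter (fun c => word.toList.contains c))).length
      = (PySem.Set.ofList word.toList).length)
      ↔ (PySem.Set.issubset (PySem.Set.ofList word.toList) (PySem.Set.ofList usersguess.toList) = true) := by
    rw [count_eq_iff_subset, PySem.Set.issubset_iff]
    constructor
    · intro h c hc
      exact (PySem.Set.mem_ofList _ _).mpr (h c ((PySem.Set.mem_ofList _ _).mp hc))
    · intro h c hc
      exact (PySem.Set.mem_ofList _ _).mp (h c ((PySem.Set.mem_ofList _ _).mpr hc))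
  simp only [List.nil_append]
  split_ifs with h1 h2 h2
  · rfl
  · exact absurd (hiff.mp h1) h2
  · exact absurd (hiff.mpr h2) h1
  · rfl
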